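-- pv_equiv track=rewrite | github.com/DrAugus/draugus.github.io | script/auto_sidebar.py | list2map
-- ===== SOURCE A (Python) =====
-- def list2map(dir_list):
--     # list 格式为 全部文件及目录
--     res_map = {}
--     for v in dir_list:
--         if v.endswith('.md'):
--             prefix = v[:v.rfind("/") + 1]
--             if prefix not in res_map:
--                 res_map[prefix] = []
--             res_map[prefix].append(v)
--     return res_map
-- ===== SOURCE B (Python) =====
-- def list2map(dir_list):
--     mds = [v for v in dir_list if v.endswith('.md')]
--     return {p: [v for v in mds if v[:v.rfind("/") + 1] == p]
--             for p in dict.fromkeys(v[:v.rfind("/") + 1] for v in mds)}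
-- ===== Notes on version B (the rewrite author's own statement) =====
-- stated objective: alternative
-- what changed: replaces A's single-pass mutable-bucket accumulation with a declarative pipeline: filter the .md entries once, dedup their directory prefixes in first-occurrence order, then build each group by one scan of the filtered list per prefix
import Mathlib
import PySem

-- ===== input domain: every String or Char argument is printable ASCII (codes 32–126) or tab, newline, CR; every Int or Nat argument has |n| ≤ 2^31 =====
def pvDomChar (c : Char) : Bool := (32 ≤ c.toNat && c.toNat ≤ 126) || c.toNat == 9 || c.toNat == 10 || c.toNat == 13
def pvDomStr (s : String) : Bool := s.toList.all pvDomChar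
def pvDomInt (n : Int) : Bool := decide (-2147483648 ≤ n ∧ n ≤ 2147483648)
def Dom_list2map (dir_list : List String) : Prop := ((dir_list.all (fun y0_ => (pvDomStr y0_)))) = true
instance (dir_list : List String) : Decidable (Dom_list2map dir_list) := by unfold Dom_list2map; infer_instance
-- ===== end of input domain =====

-- B groups the .md entries by a filter + ordered-dedup + per-prefix-scan pipeline instead of
-- A's incremental mutable-bucket dict accumulation; same return value, alternative decomposition.

-- ===== PORT A =====
-- shared helper: v[:v.rfind("/") + 1], the directory prefix (both Pythons compute this exact expression)
def pvPref (v : String) : String :=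
  PySem.Str.slice v none (some (PySem.Str.rfind v "/" + 1))

def list2mapStep (d : PySem.Dict String (List String)) (v : String) :
    PySem.Dict String (List String) :=
  if PySem.Str.endswith v ".md" then
    let p := pvPref v
    let d1 := if d.contains p then d else d.insert p []
    d1.modify p [] (fun l => l ++ [v])
  else d

def list2map (dir_list : List String) : List (String × List String) :=
  (dir_list.foldl list2mapStep PySem.Dict.empty).items

-- ===== PORT B =====
def list2map_alt (dir_list : List String) : List (String × List String) :=
  let mds := dir_list.filter (fun v => PySem.Str.endswith v ".md")
  let ks := PySem.List.dedup (mds.map pvPref)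
  ks.map (fun p => (p, mds.filter (fun v => pvPref v == p)))

-- ===== PRECONDITION & SPEC =====
def Spec_list2map (dir_list : List String) (out : List (String × List String)) : Prop := out = list2map_alt dir_list
instance (dir_list : List String) (out : List (String × List String)) : Decidable (Spec_list2map dir_list out) := by unfold Spec_list2map; infer_instance

-- ===== CLAIM (what is proved, stated in full; the proofs are below) =====
def Claim_equal_list2map : Prop := ∀ (dir_list : List String), Dom_list2map dir_list → Spec_list2map dir_list (list2map dir_list)

-- ===== LEMMAS AND PROOFS =====

-- A's "if absent insert []; then append" is one dict modify with default []
theorem list2mapStep_eq (d : PySem.Dict String (List String)) (v : String) :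
    list2mapStep d v =
      if PySem.Str.endswith v ".md" then d.modify (pvPref v) [] (fun l => l ++ [v]) else d := by
  unfold list2mapStep
  by_cases hmd : PySem.Str.endswith v ".md"
  · simp only [hmd, if_true]
    by_cases hc : d.contains (pvPref v)
    · simp [hc]
    · simp only [Bool.not_eq_true] at hc
      simp [hc, PySem.Dict.modify, PySem.Dict.getD_insert_self,
        PySem.Dict.insert_insert_self, PySem.Dict.getD_of_not_contains d _ hc]
  · rw [if_neg hmd, if_neg hmd]

-- the accumulated dict, as a fold of modifies over the filtered list
theorem list2map_foldl (dir_list : List String) :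
    dir_list.foldl list2mapStep PySem.Dict.empty =
      (dir_list.filter (fun v => PySem.Str.endswith v ".md")).foldl
        (fun d v => d.modify (pvPref v) [] (fun l => l ++ [v])) PySem.Dict.empty := by
  have h : list2mapStep = fun d v =>
      if PySem.Str.endswith v ".md" then d.modify (pvPref v) [] (fun l => l ++ [v]) else d :=
    funext fun d => funext fun v => list2mapStep_eq d v
  rw [List.foldl_filter, h]

theorem list2map_spec_aux (dir_list : List String) :
    list2map dir_list = list2map_alt dir_list := by
  unfold list2map list2map_alt
  rw [list2map_foldl]
  set mds := dir_list.filter (fun v => PySem.Str.endswith v ".md") with hm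
  set D := mds.foldl (fun d v => d.modify (pvPref v) [] (fun l => l ++ [v])) PySem.Dict.empty with hD
  have hkeys : D.keys = PySem.List.dedup (mds.map pvPref) := by
    rw [hD]
    rw [PySem.Dict.keys_foldl_modify_key mds pvPref [] (fun _ v l => l ++ [v]) PySem.Dict.empty]
    show PySem.Set.update ([] : PySem.Set String) (mds.map pvPref) = _
    rw [PySem.Set.update_eq_append_filter]
    simp [PySem.List.dedup, PySem.Set.contains]
  have hnodup : D.keys.Nodup := by
    rw [hD]
    exact PySem.Dict.nodup_keys_foldl_modify_key mds pvPref [] (fun _ v l => l ++ [v])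
      PySem.Dict.empty (by simp [PySem.Dict.empty, PySem.Dict.keys])
  have hget : ∀ c, D.getD c [] = mds.filter (fun v => pvPref v == c) := by
    intro c
    have : D = (mds.map (fun v => (pvPref v, v))).foldl
        (fun d p => d.modify p.1 [] (fun l => l ++ [p.2])) PySem.Dict.empty := by
      rw [hD, List.foldl_map]
    rw [this, PySem.Dict.getD_foldl_modify_append, PySem.Dict.getD_empty]
    rw [List.filter_map]
    simp [Function.comp_def]
  rw [PySem.Dict.items_eq_map_keys D hnodup [], hkeys]
  exact List.map_congr_left (fun p _ => by rw [hget p])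

-- ===== VERDICT (by name: the statement is the Claim_ definition above) =====
theorem list2map_spec : Claim_equal_list2map := by
  intro dir_list _
  exact list2map_spec_aux dir_list
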